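-- pv_equiv track=rewrite | github.com/iocpge/iocpge.github.io | ic/Semestre_1/2 - Programmation structurée/codes/drawings.py | square_diag
-- ===== SOURCE A (Python) =====
-- def square_diag(n):
--     s = ""
--     for row in range(n):
--         for col in range(n):
--             if row - col == 0 or row + col == n - 1:
--                 s = s + "* "
--             else:
--                 s = s + ". "
--         s = s + "\n"
--     return s
-- ===== SOURCE B (Python) =====
-- def square_diag(n):
--     grid = [['.'] * n for _ in range(n)]
--     for i in range(n):
--         grid[i][i] = '*'
--         grid[i][n - 1 - i] = '*'
--     return ''.join(''.join(c + ' ' for c in row) + '\n' for row in grid)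
-- ===== Notes on version B (the rewrite author's own statement) =====
-- stated objective: alternative
-- what changed: B allocates an explicit n-by-n grid of '.' rows, marks the two diagonals by direct indexing (grid[i][i] and grid[i][n-1-i]) in a single loop, and renders in a separate join pass, instead of A's nested scan deciding each cell with an arithmetic test while accumulating a string.
import Mathlib
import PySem

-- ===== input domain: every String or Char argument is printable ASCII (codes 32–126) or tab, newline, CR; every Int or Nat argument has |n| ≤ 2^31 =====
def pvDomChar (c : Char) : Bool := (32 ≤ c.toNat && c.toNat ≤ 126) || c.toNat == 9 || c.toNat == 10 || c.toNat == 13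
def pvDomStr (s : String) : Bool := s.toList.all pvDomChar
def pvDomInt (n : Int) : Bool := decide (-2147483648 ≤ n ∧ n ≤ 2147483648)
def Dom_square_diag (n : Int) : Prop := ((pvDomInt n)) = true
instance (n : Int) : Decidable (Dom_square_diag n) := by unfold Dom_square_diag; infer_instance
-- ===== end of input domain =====

-- B builds an explicit grid, marks the two diagonals by direct indexing, then renders;
-- A decides each cell with an arithmetic test inside a nested scan (objective: alternative).

-- ===== PORT A =====
def square_diag (n : Int) : String :=
  let s := ""
  let s := (PySem.List.pyRange 0 n 1).foldl (fun s row =>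
    let s := (PySem.List.pyRange 0 n 1).foldl (fun s col =>
      if row - col == 0 || row + col == n - 1 then s ++ "* " else s ++ ". ") s
    s ++ "\n") s
  s

-- ===== PORT B =====
def square_diag_alt (n : Int) : String :=
  let grid := (PySem.List.pyRange 0 n 1).map (fun _ => PySem.List.pyRepeat ['.'] n)
  let grid := (PySem.List.pyRange 0 n 1).foldl (fun g i =>
    -- grid[i][i] = '*'; grid[i][n-1-i] = '*'  (read row i, update it, write it back)
    let row := PySem.List.pyGetD g i []
    let row := PySem.List.pySetD row i '*'
    let row := PySem.List.pySetD row (n - 1 - i) '*'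
    PySem.List.pySetD g i row) grid
  String.join (grid.map (fun row =>
    String.join (row.map (fun c => String.singleton c ++ " ")) ++ "\n"))

-- ===== PRECONDITION & SPEC =====
def Spec_square_diag (n : Int) (out : String) : Prop := out = square_diag_alt n
instance (n : Int) (out : String) : Decidable (Spec_square_diag n out) := by unfold Spec_square_diag; infer_instance

-- ===== CLAIM (what is proved, stated in full; the proofs are below) =====
def Claim_equal_square_diag : Prop := ∀ (n : Int), Dom_square_diag n → Spec_square_diag n (square_diag n)

-- ===== LEMMAS AND PROOFS =====

/-- Concatenation of `f` over a list. -/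
def joinF {α : Type} (f : α → String) : List α → String
  | [] => ""
  | x :: xs => f x ++ joinF f xs

theorem joinF_map {α β : Type} (f : β → String) (h : α → β) (l : List α) :
    joinF f (l.map h) = joinF (fun x => f (h x)) l := by
  induction l with
  | nil => rfl
  | cons x xs ih => simp [joinF, ih]

theorem joinF_congr {α : Type} {f g : α → String} {l : List α}
    (h : ∀ x ∈ l, f x = g x) : joinF f l = joinF g l := by
  induction l with
  | nil => rfl
  | cons x xs ih => simp [joinF, h x (by simp), ih (fun y hy => h y (by simp [hy]))]

theorem foldl_str {α : Type} (f : α → String) (l : List α) (init : String) :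
    l.foldl (fun s x => s ++ f x) init = init ++ joinF f l := by
  induction l generalizing init with
  | nil => simp [joinF]
  | cons x xs ih => simp [joinF, ih, String.append_assoc]

theorem join_eq_joinF {α : Type} (f : α → String) (l : List α) :
    String.join (l.map f) = joinF f l := by
  have : String.join (l.map f) = (l.map f).foldl (fun s x => s ++ id x) "" := rfl
  rw [this, foldl_str, joinF_map]
  simp

/-- A's cell string. -/
def cellA (n row col : Int) : String :=
  if row - col == 0 || row + col == n - 1 then "* " else ". "

theorem A_closed (n : Int) :
    square_diag n =
      joinF (fun row => joinF (cellA n row) (PySem.List.pyRange 0 n 1) ++ "\n")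
        (PySem.List.pyRange 0 n 1) := by
  show (PySem.List.pyRange 0 n 1).foldl (fun s row =>
      ((PySem.List.pyRange 0 n 1).foldl (fun s col =>
        if row - col == 0 || row + col == n - 1 then s ++ "* " else s ++ ". ") s) ++ "\n") ""
    = _
  have hinner : ∀ (row : Int) (s : String),
      (PySem.List.pyRange 0 n 1).foldl (fun s col =>
        if row - col == 0 || row + col == n - 1 then s ++ "* " else s ++ ". ") s
        = s ++ joinF (cellA n row) (PySem.List.pyRange 0 n 1) := by
    intro row s
    rw [show (fun s col =>
        if row - col == 0 || row + col == n - 1 then s ++ "* " else s ++ ". ")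
        = (fun s col => s ++ cellA n row col) from by
      funext s col; unfold cellA; split <;> rfl]
    exact foldl_str _ _ _
  rw [show (fun (s : String) (row : Int) =>
      ((PySem.List.pyRange 0 n 1).foldl (fun s col =>
        if row - col == 0 || row + col == n - 1 then s ++ "* " else s ++ ". ") s) ++ "\n")
      = (fun s row => s ++ (joinF (cellA n row) (PySem.List.pyRange 0 n 1) ++ "\n")) from by
    funext s row; rw [hinner, String.append_assoc]]
  rw [foldl_str]
  simp

/-- The per-row update B performs at row index `i`. -/
def updB (n i : Int) (r : List Char) : List Char :=
  PySem.List.pySetD (PySem.List.pySetD r i '*') (n - 1 - i) '*'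

/-- One grid step of B's marking loop. -/
def stepB (n : Int) (g : List (List Char)) (i : Int) : List (List Char) :=
  PySem.List.pySetD g i (updB n i (PySem.List.pyGetD g i []))

theorem fold_stepB_get (n : Int) : ∀ (k : Nat) (a : Int), 0 ≤ a → (n - a).toNat = k →
    ∀ (L : List (List Char)) (j : Nat),
      ((PySem.List.pyRange a n 1).foldl (stepB n) L)[j]? =
        if a ≤ (j : Int) ∧ (j : Int) < n then (L[j]?).map (updB n (j : Int)) else L[j]? := by
  intro k
  induction k with
  | zero =>
    intro a ha hk L j
    rw [PySem.List.pyRange_one_eq_nil (by omega)]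
    simp only [List.foldl_nil]
    rw [if_neg (by omega)]
  | succ k ih =>
    intro a ha hk L j
    rw [PySem.List.pyRange_one_cons (by omega)]
    simp only [List.foldl_cons]
    rw [ih (a + 1) (by omega) (by omega)]
    have hstep : ∀ (j' : Nat), (stepB n L a)[j']? =
        if a = (j' : Int) then
          if j' < L.length then some (updB n a (PySem.List.pyGetD L a [])) else none
        else L[j']? := by
      intro j'
      unfold stepB
      rw [show a = ((a.toNat : Nat) : Int) from by omega, PySem.List.pySetD_natCast,
        List.getElem?_set]
      split_ifs <;> first | rfl | omega
    by_cases hj : a = (j : Int)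
    · rw [if_neg (show ¬(a + 1 ≤ (j : Int) ∧ (j : Int) < n) from by omega), hstep,
        if_pos hj, if_pos (show a ≤ (j : Int) ∧ (j : Int) < n from ⟨by omega, by omega⟩)]
      by_cases hl : j < L.length
      · rw [if_pos hl, List.getElem?_eq_getElem hl]
        have hget : PySem.List.pyGetD L a [] = L[j] := by
          rw [hj, PySem.List.pyGetD_natCast]
          simp [List.getD, List.getElem?_eq_getElem hl]
        rw [hget, hj]
        rfl
      · rw [if_neg hl, List.getElem?_eq_none (by omega)]
        rfl
    · rw [hstep, if_neg hj]
      by_cases h2 : a + 1 ≤ (j : Int) ∧ (j : Int) < n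
      · rw [if_pos h2, if_pos (show a ≤ (j : Int) ∧ (j : Int) < n from ⟨by omega, h2.2⟩)]
      · rw [if_neg h2, if_neg (show ¬(a ≤ (j : Int) ∧ (j : Int) < n) from by omega)]

/-- B's row `j` after marking, as a closed form. -/
theorem marked_row (n : Int) (j : Nat) (hj : (j : Int) < n) :
    updB n (j : Int) (PySem.List.pyRepeat ['.'] n) =
      (List.range n.toNat).map
        (fun (col : Nat) =>
          if (j : Int) - (col : Int) == 0 || (j : Int) + (col : Int) == n - 1
          then '*' else '.') := by
  unfold updB
  rw [PySem.List.pyRepeat_singleton, PySem.List.pySetD_natCast,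
    PySem.List.pySetD_of_nonneg _ _ (show (0 : Int) ≤ n - 1 - (j : Int) from by omega)]
  apply List.ext_getElem
  · simp
  · intro col h1 h2
    simp only [List.getElem_set, List.getElem_map, List.getElem_range, List.getElem_replicate]
    simp only [List.length_set, List.length_replicate] at h1
    have hcol : (col : Int) < n := by omega
    by_cases hd1 : (n - 1 - (j : Int)).toNat = col
    · rw [if_pos hd1, if_pos (by simp; omega)]
    · rw [if_neg hd1]
      by_cases hd2 : j = col
      · rw [if_pos hd2, if_pos (by simp; omega)]
      · rw [if_neg hd2, if_neg (by simp; omega)]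

theorem B_closed (n : Int) :
    square_diag_alt n =
      joinF (fun row => joinF (cellA n row) (PySem.List.pyRange 0 n 1) ++ "\n")
        (PySem.List.pyRange 0 n 1) := by
  show String.join ((((PySem.List.pyRange 0 n 1).foldl (stepB n)
      ((PySem.List.pyRange 0 n 1).map (fun _ => PySem.List.pyRepeat ['.'] n))).map
        (fun row => String.join (row.map (fun c => String.singleton c ++ " ")) ++ "\n"))) = _
  rcases (by omega : 0 ≤ n ∨ n < 0) with h0 | h0
  case inr =>
    rw [PySem.List.pyRange_one_eq_nil (by omega)]
    rfl
  have hgrid : ((PySem.List.pyRange 0 n 1).foldl (stepB n)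
      ((PySem.List.pyRange 0 n 1).map (fun _ => PySem.List.pyRepeat ['.'] n)))
      = (List.range n.toNat).map
          (fun (j : Nat) => updB n (j : Int) (PySem.List.pyRepeat ['.'] n)) := by
    apply List.ext_getElem?
    intro j
    rw [fold_stepB_get n (n - 0).toNat 0 le_rfl rfl]
    by_cases hj : (j : Int) < n
    · rw [if_pos ⟨by omega, hj⟩,
        List.getElem?_map, List.getElem?_map,
        List.getElem?_eq_getElem (show j < (PySem.List.pyRange 0 n 1).length from by
          rw [PySem.List.length_pyRange_one]; omega),
        List.getElem?_eq_getElem (show j < (List.range n.toNat).length from by simp; omega)]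
      simp
    · rw [if_neg (by omega),
        List.getElem?_eq_none (show (((PySem.List.pyRange 0 n 1).map
          (fun _ => PySem.List.pyRepeat ['.'] n)).length ≤ j) from by
            rw [List.length_map, PySem.List.length_pyRange_one]; omega),
        List.getElem?_eq_none (show ((List.range n.toNat).map
          (fun (j : Nat) => updB n (j : Int) (PySem.List.pyRepeat ['.'] n))).length ≤ j from by
            simp; omega)]
  rw [hgrid, join_eq_joinF, joinF_map,
    PySem.List.pyRange_one, joinF_map]
  simp only [zero_add, sub_zero]
  apply joinF_congr
  intro j hj
  simp only [List.mem_range] at hj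
  have hjn : (j : Int) < n := by omega
  rw [marked_row n j hjn]
  congr 1
  rw [join_eq_joinF, joinF_map, joinF_map]
  apply joinF_congr
  intro col hcol
  unfold cellA
  split_ifs <;> decide

-- ===== VERDICT (by name: the statement is the Claim_ definition above) =====
theorem square_diag_spec : Claim_equal_square_diag := by
  intro n _
  unfold Spec_square_diag
  rw [A_closed, B_closed]
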